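-- pv_equiv track=rewrite | github.com/bethington/pd2-mcp-orchestrated-re | containers/memory-forensics/heap_analyzer.py | _calculate_size_distribution
-- ===== SOURCE A (Python) =====
-- from typing import Dict, List, Any, Optional, Tuple
--
-- def _calculate_size_distribution(sizes: List[int]) -> Dict[str, int]:
--     """Calculate size distribution buckets"""
--     buckets = {
--         "small_0_64": 0,
--         "medium_64_512": 0,
--         "large_512_4096": 0,
--         "xlarge_4096_plus": 0
--     }
--
--     for size in sizes:
--         if size <= 64:
--             buckets["small_0_64"] += 1
--         elif size <= 512:
--             buckets["medium_64_512"] += 1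
--         elif size <= 4096:
--             buckets["large_512_4096"] += 1
--         else:
--             buckets["xlarge_4096_plus"] += 1
--
--     return buckets
-- ===== SOURCE B (Python) =====
-- from typing import Dict, List
--
-- def _calculate_size_distribution(sizes: List[int]) -> Dict[str, int]:
--     """Staged cumulative counting: count sizes under each threshold once, then
--     take differences of the cumulative counts to fill the buckets."""
--     n = len(sizes)
--     c64 = sum(1 for s in sizes if s <= 64)
--     c512 = sum(1 for s in sizes if s <= 512)
--     c4096 = sum(1 for s in sizes if s <= 4096)
--     return {
--         "small_0_64": c64,
--         "medium_64_512": c512 - c64,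
--         "large_512_4096": c4096 - c512,
--         "xlarge_4096_plus": n - c4096,
--     }
-- ===== Notes on version B (the rewrite author's own statement) =====
-- stated objective: alternative
-- what changed: Replaces the single-pass if/elif bucket-increment loop over a dict with staged cumulative counting: three threshold counts over the list, then the buckets are differences of those cumulative counts; correct because the buckets partition by nested <= thresholds.
import Mathlib
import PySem

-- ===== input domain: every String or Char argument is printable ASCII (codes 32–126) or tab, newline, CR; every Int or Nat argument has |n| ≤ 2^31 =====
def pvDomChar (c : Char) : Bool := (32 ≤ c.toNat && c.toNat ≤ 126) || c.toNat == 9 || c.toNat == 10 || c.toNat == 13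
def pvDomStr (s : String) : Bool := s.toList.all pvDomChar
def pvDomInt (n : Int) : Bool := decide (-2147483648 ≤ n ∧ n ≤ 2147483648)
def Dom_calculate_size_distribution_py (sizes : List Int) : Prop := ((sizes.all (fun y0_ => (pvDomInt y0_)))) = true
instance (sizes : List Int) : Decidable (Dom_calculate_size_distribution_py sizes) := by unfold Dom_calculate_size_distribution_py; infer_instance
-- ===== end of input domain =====

-- B replaces A's per-element if/elif bucket-increment loop with staged cumulative counting
-- (three threshold counts, buckets as their differences); objective: alternative, same O(n).

-- ===== PORT A =====
-- literal port of A: dict seeded with the four buckets, then the if/elif increment loop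
def calculate_size_distribution_py (sizes : List Int) : List (String × Int) :=
  let buckets : PySem.Dict String Int :=
    PySem.Dict.ofList [("small_0_64", 0), ("medium_64_512", 0), ("large_512_4096", 0), ("xlarge_4096_plus", 0)]
  let buckets := sizes.foldl (fun b size =>
    if size ≤ 64 then b.modify "small_0_64" 0 (· + 1)
    else if size ≤ 512 then b.modify "medium_64_512" 0 (· + 1)
    else if size ≤ 4096 then b.modify "large_512_4096" 0 (· + 1)
    else b.modify "xlarge_4096_plus" 0 (· + 1)) buckets
  buckets.items

-- ===== PORT B =====
-- sum(1 for s in sizes if s <= t): filter, then sum of ones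
def pvSumOnes (sizes : List Int) (t : Int) : Int :=
  ((sizes.filter (fun s => s ≤ t)).map (fun _ => (1 : Int))).sum

def calculate_size_distribution_py_alt (sizes : List Int) : List (String × Int) :=
  let n : Int := sizes.length
  let c64 := pvSumOnes sizes 64
  let c512 := pvSumOnes sizes 512
  let c4096 := pvSumOnes sizes 4096
  [("small_0_64", c64), ("medium_64_512", c512 - c64),
   ("large_512_4096", c4096 - c512), ("xlarge_4096_plus", n - c4096)]

-- ===== PRECONDITION & SPEC =====
def Spec_calculate_size_distribution_py (sizes : List Int) (out : List (String × Int)) : Prop := out = calculate_size_distribution_py_alt sizes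
instance (sizes : List Int) (out : List (String × Int)) : Decidable (Spec_calculate_size_distribution_py sizes out) := by unfold Spec_calculate_size_distribution_py; infer_instance

-- ===== CLAIM (what is proved, stated in full; the proofs are below) =====
def Claim_equal_calculate_size_distribution_py : Prop := ∀ (sizes : List Int), Dom_calculate_size_distribution_py sizes → Spec_calculate_size_distribution_py sizes (calculate_size_distribution_py sizes)

-- ===== LEMMAS AND PROOFS =====
-- literal 4-entry dict with symbolic values, used as the loop invariant's shape
def pvD4 (v1 v2 v3 v4 : Int) : PySem.Dict String Int :=
  PySem.Dict.mk [("small_0_64", v1), ("medium_64_512", v2), ("large_512_4096", v3), ("xlarge_4096_plus", v4)]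

theorem pvD4_ofList (v1 v2 v3 v4 : Int) :
    PySem.Dict.ofList [("small_0_64", v1), ("medium_64_512", v2), ("large_512_4096", v3), ("xlarge_4096_plus", v4)]
      = pvD4 v1 v2 v3 v4 := by
  simp [pvD4, PySem.Dict.ofList, PySem.Dict.update, PySem.Dict.insert, PySem.Dict.empty,
    PySem.Dict.contains, List.foldl]

theorem pvSumOnes_eq_countP (sizes : List Int) (t : Int) :
    pvSumOnes sizes t = ((sizes.countP (fun s => s ≤ t) : Nat) : Int) := by
  induction sizes with
  | nil => rfl
  | cons x xs ih =>
      by_cases h : x ≤ t <;> simp [pvSumOnes, h] at ih ⊢ <;> omega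

theorem pv_modify_small (w1 w2 w3 w4 : Int) :
    (pvD4 w1 w2 w3 w4).modify "small_0_64" 0 (· + 1) = pvD4 (w1 + 1) w2 w3 w4 := by
  simp [pvD4, PySem.Dict.modify, PySem.Dict.getD, PySem.Dict.get?, PySem.Dict.insert, PySem.Dict.contains]

theorem pv_modify_medium (w1 w2 w3 w4 : Int) :
    (pvD4 w1 w2 w3 w4).modify "medium_64_512" 0 (· + 1) = pvD4 w1 (w2 + 1) w3 w4 := by
  simp [pvD4, PySem.Dict.modify, PySem.Dict.getD, PySem.Dict.get?, PySem.Dict.insert, PySem.Dict.contains]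

theorem pv_modify_large (w1 w2 w3 w4 : Int) :
    (pvD4 w1 w2 w3 w4).modify "large_512_4096" 0 (· + 1) = pvD4 w1 w2 (w3 + 1) w4 := by
  simp [pvD4, PySem.Dict.modify, PySem.Dict.getD, PySem.Dict.get?, PySem.Dict.insert, PySem.Dict.contains]

theorem pv_modify_xlarge (w1 w2 w3 w4 : Int) :
    (pvD4 w1 w2 w3 w4).modify "xlarge_4096_plus" 0 (· + 1) = pvD4 w1 w2 w3 (w4 + 1) := by
  simp [pvD4, PySem.Dict.modify, PySem.Dict.getD, PySem.Dict.get?, PySem.Dict.insert, PySem.Dict.contains]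

-- A's loop, run from any 4-value state, adds the per-bucket counts
theorem pv_loop (sizes : List Int) : ∀ (v1 v2 v3 v4 : Int),
    sizes.foldl (fun b size =>
      if size ≤ 64 then b.modify "small_0_64" 0 (· + 1)
      else if size ≤ 512 then b.modify "medium_64_512" 0 (· + 1)
      else if size ≤ 4096 then b.modify "large_512_4096" 0 (· + 1)
      else b.modify "xlarge_4096_plus" 0 (· + 1)) (pvD4 v1 v2 v3 v4)
    = pvD4 (v1 + (sizes.countP (fun s => s ≤ 64) : Nat))
           (v2 + ((sizes.countP (fun s => s ≤ 512) : Nat) - (sizes.countP (fun s => s ≤ 64) : Nat)))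
           (v3 + ((sizes.countP (fun s => s ≤ 4096) : Nat) - (sizes.countP (fun s => s ≤ 512) : Nat)))
           (v4 + ((sizes.length : Nat) - (sizes.countP (fun s => s ≤ 4096) : Nat))) := by
  induction sizes with
  | nil => intro v1 v2 v3 v4; simp
  | cons x xs ih =>
      intro v1 v2 v3 v4
      rw [List.foldl_cons]
      by_cases h1 : x ≤ 64
      · have h2 : x ≤ 512 := by omega
        have h3 : x ≤ 4096 := by omega
        rw [if_pos h1, pv_modify_small, ih]
        simp [pvD4, h1, h2, h3]
        omega
      · by_cases h2 : x ≤ 512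
        · have h3 : x ≤ 4096 := by omega
          rw [if_neg h1, if_pos h2, pv_modify_medium, ih]
          simp [pvD4, h1, h2, h3]
          omega
        · by_cases h3 : x ≤ 4096
          · rw [if_neg h1, if_neg h2, if_pos h3, pv_modify_large, ih]
            simp [pvD4, h1, h2, h3]
            omega
          · rw [if_neg h1, if_neg h2, if_neg h3, pv_modify_xlarge, ih]
            simp [pvD4, h1, h2, h3]
            omega

-- ===== VERDICT (by name: the statement is the Claim_ definition above) =====
theorem calculate_size_distribution_py_spec : Claim_equal_calculate_size_distribution_py := by
  intro sizes _
  unfold Spec_calculate_size_distribution_py calculate_size_distribution_py calculate_size_distribution_py_alt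
  simp only [pvD4_ofList, pv_loop, pvSumOnes_eq_countP]
  simp [pvD4]
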